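-- pv_equiv track=rewrite | github.com/quepas/advent-of-code | 2023/12/run.py | find_usable_range_of_spring_groups
-- ===== SOURCE A (Python) =====
-- def find_usable_range_of_spring_groups(text: str) -> tuple[int, int]:
--     """
--     Find start (inclusive) and end (exclusive) indices of possible placement of damaged spring groups.
--     In other words, on each end, find the first non-"." character
--     """
--     left, right = 0, len(text) - 1
--     usable = (None, None)
--     while left <= right:
--         if text[left] == ".":
--             left += 1
--         elif usable[0] is None:
--             usable = (left, usable[1])
--         if text[right] == ".":
--             right -= 1
--         elif usable[1] is None:
--             usable = (usable[0], right)
--         # Early exit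
--         if usable[0] is not None and usable[1] is not None:
--             break
--     return usable[0], usable[1] + 1
-- ===== SOURCE B (Python) =====
-- def find_usable_range_of_spring_groups(text: str) -> tuple[int, int]:
--     # Single forward pass with an accumulator: track the first and last non-'.'
--     # index seen so far; no backward scan, no two-pointer state, no early exit.
--     first = None
--     last = None
--     for i, ch in enumerate(text):
--         if ch != ".":
--             if first is None:
--                 first = i
--             last = i
--     return first, last + 1
-- ===== Notes on version B (the rewrite author's own statement) =====
-- stated objective: simpler
-- what changed: Replaces A's fused bidirectional two-pointer scan (tuple state, early exit) by a single forward pass that accumulates the first and the last non-'.' index.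
import Mathlib
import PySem

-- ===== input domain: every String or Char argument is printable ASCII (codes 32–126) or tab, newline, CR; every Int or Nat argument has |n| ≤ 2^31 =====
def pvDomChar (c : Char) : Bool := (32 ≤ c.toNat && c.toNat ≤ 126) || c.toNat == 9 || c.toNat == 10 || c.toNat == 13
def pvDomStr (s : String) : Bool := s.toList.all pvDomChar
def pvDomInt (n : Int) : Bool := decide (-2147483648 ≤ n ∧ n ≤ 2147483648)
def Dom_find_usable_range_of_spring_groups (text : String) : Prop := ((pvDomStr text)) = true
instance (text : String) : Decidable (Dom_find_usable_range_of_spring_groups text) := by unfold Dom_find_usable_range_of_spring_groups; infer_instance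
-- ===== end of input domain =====

-- B replaces A's fused bidirectional two-pointer loop (tuple state, early exit) by a
-- single forward pass accumulating the first and the last non-'.' index; objective: simpler.

-- ===== PORT A =====
-- A's fused while-loop; indices touched inside the loop satisfy 0 ≤ left ≤ right < |cs|,
-- so pyGetD with an arbitrary default is exact there (Python's text[i]).
def pvLoopA (cs : List Char) :
    Nat → Int → Int → Option Int × Option Int → Option Int × Option Int
  | 0, _, _, u => u
  | fuel + 1, left, right, u =>
    if hlr : left ≤ right then
    if c1 : PySem.List.pyGetD cs left '.' = '.' then
      if c2 : PySem.List.pyGetD cs right '.' = '.' then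
        -- left += 1; right -= 1; early-exit test on unchanged u
        if u.1 ≠ none ∧ u.2 ≠ none then u else pvLoopA cs fuel (left + 1) (right - 1) u
      else
        -- left += 1; usable = (usable[0], right) if usable[1] was None
        let u1 := if u.2 = none then some right else u.2
        if u.1 ≠ none ∧ u1 ≠ none then (u.1, u1) else pvLoopA cs fuel (left + 1) right (u.1, u1)
    else
      let u0 := if u.1 = none then some left else u.1
      if c2 : PySem.List.pyGetD cs right '.' = '.' then
        if u0 ≠ none ∧ u.2 ≠ none then (u0, u.2) else pvLoopA cs fuel left (right - 1) (u0, u.2)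
      else
        let u1 := if u.2 = none then some right else u.2
        -- the early-exit test is true here: u0 and u1 are both non-None
        (u0, u1)
    else u

-- 'return usable[0], usable[1] + 1'; where a component is None the Python raises TypeError
-- (excluded by Pre_), the port returns a default there.
def find_usable_range_of_spring_groups (text : String) : Int × Int :=
  let cs := text.toList
  let u := pvLoopA cs (cs.length + 1) 0 ((cs.length : Int) - 1) (none, none)
  ((u.1.getD 0), (u.2.getD 0) + 1)

-- ===== PORT B =====
-- the body of B's for-loop: 'if ch != ".": (if first is None: first = i); last = i'
def pvStepB (acc : Option Int × Option Int) (ic : Int × Char) : Option Int × Option Int :=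
  if ic.2 ≠ '.' then ((if acc.1 = none then some ic.1 else acc.1), some ic.1) else acc

def find_usable_range_of_spring_groups_alt (text : String) : Int × Int :=
  let cs := text.toList
  let p := (PySem.List.enumerate cs).foldl pvStepB (none, none)
  ((p.1.getD 0), (p.2.getD 0) + 1)

-- ===== PRECONDITION & SPEC =====
-- Pre_ excludes exactly the strings with no non-'.' character (including the empty string):
-- there both A and B raise TypeError (None + 1).
def Pre_find_usable_range_of_spring_groups (text : String) : Prop :=
  text.toList.any (fun c => c != '.') = true
instance (text : String) : Decidable (Pre_find_usable_range_of_spring_groups text) := by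
  unfold Pre_find_usable_range_of_spring_groups; infer_instance

def pvWitness_find_usable_range_of_spring_groups : String := ".#."

def Spec_find_usable_range_of_spring_groups (text : String) (out : Int × Int) : Prop :=
  out = find_usable_range_of_spring_groups_alt text
instance (text : String) (out : Int × Int) : Decidable (Spec_find_usable_range_of_spring_groups text out) := by
  unfold Spec_find_usable_range_of_spring_groups; infer_instance

-- ===== CLAIM (what is proved, stated in full; the proofs are below) =====
def Claim_equal_find_usable_range_of_spring_groups : Prop :=
  ∀ (text : String), Dom_find_usable_range_of_spring_groups text →
    Pre_find_usable_range_of_spring_groups text →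
    Spec_find_usable_range_of_spring_groups text (find_usable_range_of_spring_groups text)

-- ===== LEMMAS AND PROOFS =====

-- proof-only helper: the first non-dot index at or after position i
def pvFwd (cs : List Char) (i : Int) : Option Int :=
  match cs with
  | [] => none
  | c :: tl => if c ≠ '.' then some i else pvFwd tl (i + 1)

-- proof-only helper: the last non-dot index at or below position j
def pvBack (cs : List Char) (j : Int) : Option Int :=
  if hj : 0 ≤ j then
    if PySem.List.pyGetD cs j '.' ≠ '.' then some j else pvBack cs (j - 1)
  else none
termination_by (j + 1).toNat
decreasing_by omega

-- proof-only helper: the last non-dot index, computed structurally forwards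
def pvLast (cs : List Char) (k : Int) : Option Int :=
  match cs with
  | [] => none
  | c :: tl =>
    match pvLast tl (k + 1) with
    | some j => some j
    | none => if c ≠ '.' then some k else none

-- B's fold computes (first non-dot via pvFwd, last non-dot via pvLast).
lemma foldB_eq (cs : List Char) : ∀ (k : Int) (acc : Option Int × Option Int),
    (PySem.List.enumerate cs k).foldl pvStepB acc =
      ((match acc.1 with | some j => some j | none => pvFwd cs k),
       (match pvLast cs k with | some j => some j | none => acc.2)) := by
  induction cs with
  | nil =>
    intro k acc
    obtain ⟨a1, a2⟩ := acc
    cases a1 <;> simp [PySem.List.enumerate, pvFwd, pvLast]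
  | cons c tl ih =>
    intro k acc
    obtain ⟨a1, a2⟩ := acc
    rw [PySem.List.enumerate_cons, List.foldl_cons, ih]
    by_cases hc : c = '.' <;>
      cases h : pvLast tl (k + 1) <;> cases a1 <;>
        simp [pvStepB, pvLast, pvFwd, hc, h]

lemma pvLast_none (cs : List Char) (h : ∀ c ∈ cs, c = '.') :
    ∀ k : Int, pvLast cs k = none := by
  induction cs with
  | nil => intro k; simp [pvLast]
  | cons c tl ih =>
    intro k
    rw [pvLast, ih (fun c' hc' => h c' (List.mem_cons_of_mem _ hc'))]
    simp [h c List.mem_cons_self]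

lemma pvLast_eq_some (cs : List Char) : ∀ (kn : Nat), (kn < cs.length) →
    cs.getD kn '.' ≠ '.' →
    (∀ m : Nat, (h : m < cs.length) → kn < m → cs[m] = '.') →
    ∀ k0 : Int, pvLast cs k0 = some (k0 + kn) := by
  induction cs with
  | nil => intro kn hk; simp at hk
  | cons c tl ih =>
    intro kn hk hnd hsuf k0
    cases kn with
    | zero =>
      have htl : ∀ c' ∈ tl, c' = '.' := by
        intro c' hc'
        obtain ⟨m, hm, rfl⟩ := List.mem_iff_getElem.mp hc'
        have := hsuf (m + 1) (by simpa using hm) (by omega)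
        simpa using this
      rw [pvLast, pvLast_none tl htl]
      simp only [List.getD_cons_zero] at hnd
      simp [hnd]
    | succ m =>
      have := ih m (by simpa using hk) (by simpa using hnd)
        (fun m' hm' hmm' => by
          have := hsuf (m' + 1) (by simpa using hm') (by omega)
          simpa using this) (k0 + 1)
      rw [pvLast, this]
      have e : k0 + 1 + (m : Int) = k0 + ((m + 1 : Nat) : Int) := by push_cast; ring
      exact congrArg some e

-- B's forward scan finds the first non-dot index.
lemma pvFwd_eq_some (cs : List Char) (i : Int) (j : Nat) (hj : j < cs.length)
    (hnd : cs[j] ≠ '.') (hpre : ∀ m, (h : m < cs.length) → m < j → cs[m] = '.') :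
    pvFwd cs i = some (i + j) := by
  induction cs generalizing i j with
  | nil => simp at hj
  | cons c tl ih =>
    by_cases hc : c = '.'
    · cases j with
      | zero => simp at hnd; exact absurd hc hnd
      | succ j' =>
        rw [pvFwd]
        simp only [hc, ne_eq, not_true_eq_false, if_false]
        have := ih (i + 1) j' (by simpa using hj) (by simpa using hnd)
          (fun m hm hmj => by
            have := hpre (m + 1) (by simpa using hm) (by omega)
            simpa using this)
        rw [this]; congr 1; push_cast; ring
    · have hj0 : j = 0 := by
        by_contra h0
        exact hc (by simpa using hpre 0 (by omega) (by omega))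
      subst hj0
      rw [pvFwd]
      simp [hc]

-- The backward scan, started anywhere at or above the last non-dot index, finds it.
lemma pvBack_step (cs : List Char) (k : Nat)
    (hnd : cs.getD k '.' ≠ '.')
    (hsuf : ∀ m : Nat, (h : m < cs.length) → k < m → cs[m] = '.') :
    ∀ d : Nat, (k : Int) + d < (cs.length : Int) → pvBack cs ((k : Int) + d) = some (k : Int) := by
  intro d
  induction d with
  | zero =>
    intro _
    have e : (k : Int) + ((0 : Nat) : Int) = (k : Int) := by push_cast; ring
    rw [e, pvBack, dif_pos (by positivity),
      PySem.List.pyGetD_of_nonneg cs '.' (by positivity)]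
    simp only [Int.toNat_natCast]
    rw [if_pos hnd]
  | succ d' ih =>
    intro hlt
    have h0 : (0 : Int) ≤ (k : Int) + ((d' + 1 : Nat) : Int) := by positivity
    rw [pvBack, dif_pos h0, PySem.List.pyGetD_of_nonneg cs '.' h0]
    have hmn : ((k : Int) + ((d' + 1 : Nat) : Int)).toNat < cs.length := by
      push_cast at hlt ⊢; omega
    have hdot : cs.getD ((k : Int) + ((d' + 1 : Nat) : Int)).toNat '.' = '.' := by
      rw [List.getD_eq_getElem cs '.' hmn]
      exact hsuf _ hmn (by push_cast; omega)
    rw [if_neg (by simpa using hdot)]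
    have e : (k : Int) + ((d' + 1 : Nat) : Int) - 1 = (k : Int) + ((d' : Nat) : Int) := by
      push_cast; ring
    rw [e]
    exact ih (by push_cast at hlt ⊢; omega)

lemma pvBack_eq_some (cs : List Char) (k : Nat) (_hk : k < cs.length)
    (hnd : cs.getD k '.' ≠ '.')
    (hsuf : ∀ m : Nat, (h : m < cs.length) → k < m → cs[m] = '.')
    (j : Int) (hkj : (k : Int) ≤ j) (hjn : j < (cs.length : Int)) :
    pvBack cs j = some (k : Int) := by
  have e : j = (k : Int) + ((j - k).toNat : Int) := by omega
  rw [e]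
  exact pvBack_step cs k hnd hsuf _ (by omega)

-- The invariant of A's fused loop: started in a consistent state it returns exactly
-- (first non-dot index as found by pvFwd, last non-dot index as found by pvBack).
lemma pvLoopA_inv (cs : List Char) :
    ∀ (N : Nat) (left right : Int) (u0 u1 : Option Int),
      (right - left + 1).toNat ≤ N →
      0 ≤ left → right < (cs.length : Int) →
      (u0 = none → ∀ m : Nat, (h : m < cs.length) → (m : Int) < left → cs[m] = '.') →
      (∀ j, u0 = some j → left = j ∧ 0 ≤ j ∧ cs.getD j.toNat '.' ≠ '.' ∧ pvFwd cs 0 = some j) →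
      (u1 = none → ∀ m : Nat, (h : m < cs.length) → right < (m : Int) → cs[m] = '.') →
      (∀ k, u1 = some k → right = k ∧ 0 ≤ k ∧ cs.getD k.toNat '.' ≠ '.' ∧
        pvBack cs ((cs.length : Int) - 1) = some k) →
      ¬(u0 ≠ none ∧ u1 ≠ none) →
      (u0 ≠ none ∨ u1 ≠ none → left ≤ right) →
      (∃ c ∈ cs, c ≠ '.') →
      ∃ a b, pvLoopA cs N left right (u0, u1) = (some a, some b) ∧
        pvFwd cs 0 = some a ∧ pvBack cs ((cs.length : Int) - 1) = some b := by
  intro N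
  induction N with
  | zero =>
    intro left right u0 u1 hN hl hr hB hC hD hE hF hLR hPre
    -- measure 0 forces left > right: the loop would exit; this state is unreachable under Pre_
    rcases hPre with ⟨c, hc, hcne⟩
    obtain ⟨m, hm, rfl⟩ := List.mem_iff_getElem.mp hc
    cases h0 : u0 with
    | some j => exact absurd (hLR (Or.inl (by simp [h0]))) (by omega)
    | none =>
      cases h1 : u1 with
      | some k => exact absurd (hLR (Or.inr (by simp [h1]))) (by omega)
      | none =>
        by_cases hml : (m : Int) < left
        · exact absurd (hB h0 m hm hml) hcne
        · exact absurd (hD h1 m hm (by omega)) hcne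
  | succ N ih =>
    intro left right u0 u1 hN hl hr hB hC hD hE hF hLR hPre
    by_cases hlr : left ≤ right
    · have hln : left.toNat < cs.length := by omega
      have hrn : right.toNat < cs.length := by omega
      have hr0 : (0 : Int) ≤ right := by omega
      have hgl : PySem.List.pyGetD cs left '.' = cs.getD left.toNat '.' :=
        PySem.List.pyGetD_of_nonneg cs '.' hl
      have hgr : PySem.List.pyGetD cs right '.' = cs.getD right.toNat '.' :=
        PySem.List.pyGetD_of_nonneg cs '.' hr0
      rw [pvLoopA, dif_pos hlr]
      by_cases c1 : PySem.List.pyGetD cs left '.' = '.'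
      · -- cs[left] = '.'  ⇒  u0 must still be none
        have hu0 : u0 = none := by
          cases h0 : u0 with
          | none => rfl
          | some j =>
            obtain ⟨hje, hj0, hjnd, _⟩ := hC j h0
            exact absurd (by rw [← hje, ← hgl]; exact c1) hjnd
        subst hu0
        rw [dif_pos c1]
        by_cases c2 : PySem.List.pyGetD cs right '.' = '.'
        · -- both ends dots: u unchanged, both pointers move
          have hu1 : u1 = none := by
            cases h1 : u1 with
            | none => rfl
            | some k =>
              obtain ⟨hke, hk0, hknd, _⟩ := hE k h1
              exact absurd (by rw [← hke, ← hgr]; exact c2) hknd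
          subst hu1
          rw [dif_pos c2, if_neg (by simp)]
          refine ih (left + 1) (right - 1) none none (by omega) (by omega) (by omega)
            ?_ (by simp) ?_ (by simp) (by simp) (by simp) hPre
          · intro _ m hm hml
            by_cases h : (m : Int) < left
            · exact hB rfl m hm h
            · have : m = left.toNat := by omega
              subst this
              rw [← List.getD_eq_getElem cs '.' hm, ← hgl]; exact c1
          · intro _ m hm hmr
            by_cases h : right < (m : Int)
            · exact hD rfl m hm h
            · have : m = right.toNat := by omega
              subst this
              rw [← List.getD_eq_getElem cs '.' hm, ← hgr]; exact c2
        · -- left end dot, right end non-dot: usable[1] gets set (if not yet)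
          rw [dif_neg c2]
          have hE' : ∀ k, (if u1 = none then some right else u1) = some k →
              right = k ∧ 0 ≤ k ∧ cs.getD k.toNat '.' ≠ '.' ∧
              pvBack cs ((cs.length : Int) - 1) = some k := by
            intro k hk
            cases h1 : u1 with
            | some k' => rw [h1] at hk; simp at hk; subst hk; exact hE k' h1
            | none =>
              rw [h1] at hk; simp at hk; subst hk
              refine ⟨rfl, hr0, by rw [← hgr]; exact c2, ?_⟩
              have := pvBack_eq_some cs right.toNat hrn
                (by rw [← hgr]; simpa using c2)
                (fun m hm hmgt => hD h1 m hm (by omega))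
                ((cs.length : Int) - 1) (by omega) (by omega)
              rwa [Int.toNat_of_nonneg hr0] at this
          have hu1s : (if u1 = none then some right else u1) ≠ none := by
            cases h1 : u1 <;> simp
          have hlltr : left < right := by
            rcases lt_or_eq_of_le hlr with h | h
            · exact h
            · exfalso; rw [h] at c1; exact c2 c1
          rw [if_neg (by simp)]
          refine ih (left + 1) right none _ (by omega) (by omega) hr
            ?_ (by simp) (by intro h; exact absurd h hu1s) hE'
            (by simp) (fun _ => by omega) hPre
          intro _ m hm hml
          by_cases h : (m : Int) < left
          · exact hB rfl m hm h
          · have : m = left.toNat := by omega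
            subst this
            rw [← List.getD_eq_getElem cs '.' hm, ← hgl]; exact c1
      · -- left end non-dot: usable[0] gets set (if not yet)
        rw [dif_neg c1]
        have hC' : ∀ j, (if u0 = none then some left else u0) = some j →
            left = j ∧ 0 ≤ j ∧ cs.getD j.toNat '.' ≠ '.' ∧ pvFwd cs 0 = some j := by
          intro j hj
          cases h0 : u0 with
          | some j' => rw [h0] at hj; simp at hj; subst hj; exact hC j' h0
          | none =>
            rw [h0] at hj; simp at hj; subst hj
            refine ⟨rfl, hl, by rw [← hgl]; exact c1, ?_⟩
            have := pvFwd_eq_some cs 0 left.toNat hln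
              (by rw [← List.getD_eq_getElem cs '.' hln, ← hgl]; exact c1)
              (fun m hm hmlt => hB h0 m hm (by omega))
            rwa [zero_add, Int.toNat_of_nonneg hl] at this
        have hu0s : (if u0 = none then some left else u0) ≠ none := by
          cases h0 : u0 <;> simp
        by_cases c2 : PySem.List.pyGetD cs right '.' = '.'
        · -- right end dot ⇒ u1 must still be none; right moves
          have hu1 : u1 = none := by
            cases h1 : u1 with
            | none => rfl
            | some k =>
              obtain ⟨hke, hk0, hknd, _⟩ := hE k h1
              exact absurd (by rw [← hke, ← hgr]; exact c2) hknd
          subst hu1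
          rw [dif_pos c2, if_neg (by simp)]
          have hlltr : left < right := by
            rcases lt_or_eq_of_le hlr with h | h
            · exact h
            · exfalso; rw [← h] at c2; exact c1 c2
          refine ih left (right - 1) _ none (by omega) hl (by omega)
            (by intro h; exact absurd h hu0s) hC' ?_ (by simp)
            (by simp) (fun _ => by omega) hPre
          intro _ m hm hmr
          by_cases h : right < (m : Int)
          · exact hD rfl m hm h
          · have : m = right.toNat := by omega
            subst this
            rw [← List.getD_eq_getElem cs '.' hm, ← hgr]; exact c2
        · -- both ends non-dot: both components set, the break fires
          rw [dif_neg c2]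
          obtain ⟨a, ha⟩ : ∃ a, (if u0 = none then some left else u0) = some a := by
            cases h0 : u0 <;> simp
          obtain ⟨hae, _, _, hfa⟩ := hC' a ha
          have hE' : ∀ k, (if u1 = none then some right else u1) = some k →
              right = k ∧ pvBack cs ((cs.length : Int) - 1) = some k := by
            intro k hk
            cases h1 : u1 with
            | some k' =>
              rw [h1] at hk; simp at hk; subst hk
              obtain ⟨h1e, _, _, h1b⟩ := hE k' h1
              exact ⟨h1e, h1b⟩
            | none =>
              rw [h1] at hk; simp at hk; subst hk
              refine ⟨rfl, ?_⟩
              have := pvBack_eq_some cs right.toNat hrn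
                (by rw [← hgr]; simpa using c2)
                (fun m hm hmgt => hD h1 m hm (by omega))
                ((cs.length : Int) - 1) (by omega) (by omega)
              rwa [Int.toNat_of_nonneg hr0] at this
          obtain ⟨b, hb⟩ : ∃ b, (if u1 = none then some right else u1) = some b := by
            cases h1 : u1 <;> simp
          obtain ⟨hbe, hgb⟩ := hE' b hb
          exact ⟨a, b, by rw [ha, hb], hfa, hgb⟩
    · -- left > right: the loop would exit; unreachable under Pre_ (same as the base case)
      rw [pvLoopA, dif_neg hlr]
      rcases hPre with ⟨c, hc, hcne⟩
      obtain ⟨m, hm, rfl⟩ := List.mem_iff_getElem.mp hc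
      cases h0 : u0 with
      | some j => exact absurd (hLR (Or.inl (by simp [h0]))) (by omega)
      | none =>
        cases h1 : u1 with
        | some k => exact absurd (hLR (Or.inr (by simp [h1]))) (by omega)
        | none =>
          by_cases hml : (m : Int) < left
          · exact absurd (hB h0 m hm hml) hcne
          · exact absurd (hD h1 m hm (by omega)) hcne

-- ===== VERDICT (by name: the statement is the Claim_ definition above) =====
theorem find_usable_range_of_spring_groups_spec :
    Claim_equal_find_usable_range_of_spring_groups := by
  intro text _ hPre
  unfold Spec_find_usable_range_of_spring_groups
  unfold find_usable_range_of_spring_groups find_usable_range_of_spring_groups_alt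
  set cs := text.toList with hcs
  have hPre' : ∃ c ∈ cs, c ≠ '.' := by
    obtain ⟨c, hc, hcne⟩ := List.any_eq_true.mp hPre
    exact ⟨c, hc, by simpa using hcne⟩
  -- the first non-dot index, via findIdx
  have hminlt : cs.findIdx (fun c => c != '.') < cs.length := by
    refine List.findIdx_lt_length.mpr ?_
    obtain ⟨c, hc, hcne⟩ := hPre'
    exact ⟨c, hc, by simpa using hcne⟩
  have hndmin : cs[cs.findIdx (fun c => c != '.')] ≠ '.' := by
    simpa using List.findIdx_getElem (w := hminlt)
  have hpremin : ∀ m, (h : m < cs.length) → m < cs.findIdx (fun c => c != '.') →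
      cs[m] = '.' := by
    intro m hm hlt
    have := List.not_of_lt_findIdx (p := fun c => c != '.') (xs := cs) hlt
    simpa using this
  -- the last non-dot index, via findIdx on the reverse
  have hexr : ∃ x ∈ cs.reverse, (x != '.') = true := by
    obtain ⟨c, hc, hcne⟩ := hPre'
    exact ⟨c, List.mem_reverse.mpr hc, by simpa using hcne⟩
  have hkrlt : cs.reverse.findIdx (fun c => c != '.') < cs.length := by
    have := List.findIdx_lt_length.mpr hexr
    simpa using this
  have hlen : 0 < cs.length := by omega
  have hjmaxlt : cs.length - 1 - cs.reverse.findIdx (fun c => c != '.') < cs.length := by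
    omega
  have hkrlt' : cs.reverse.findIdx (fun c => c != '.') < cs.reverse.length := by
    simpa using hkrlt
  have hndmax : cs[cs.length - 1 - cs.reverse.findIdx (fun c => c != '.')]'hjmaxlt ≠ '.' := by
    have h1 : (cs.reverse[cs.reverse.findIdx (fun c => c != '.')]'hkrlt' != '.') = true :=
      List.findIdx_getElem (w := hkrlt')
    rw [List.getElem_reverse hkrlt'] at h1
    simpa using h1
  have hsufmax : ∀ m : Nat, (h : m < cs.length) →
      cs.length - 1 - cs.reverse.findIdx (fun c => c != '.') < m → cs[m] = '.' := by
    intro m hm hgt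
    have hi : cs.length - 1 - m < cs.reverse.findIdx (fun c => c != '.') := by omega
    have hib : cs.length - 1 - m < cs.reverse.length := by simpa using (by omega : cs.length - 1 - m < cs.length)
    have h1 := List.not_of_lt_findIdx (p := fun c => c != '.') (xs := cs.reverse) hi
    have e : cs.reverse[cs.length - 1 - m]'hib = cs[m]'hm := by
      rw [List.getElem_reverse hib]
      exact getElem_congr_idx (by omega)
    rw [← e]
    simpa using h1
  -- characterizations of the two shared helper scans at those indices
  have hfwd : pvFwd cs 0 = some ((0 : Int) + (cs.findIdx (fun c => c != '.') : Nat)) :=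
    pvFwd_eq_some cs 0 _ hminlt hndmin hpremin
  have hgetD : cs.getD (cs.length - 1 - cs.reverse.findIdx (fun c => c != '.')) '.' ≠ '.' := by
    rw [List.getD_eq_getElem cs '.' hjmaxlt]; exact hndmax
  have hback : pvBack cs ((cs.length : Int) - 1) =
      some ((cs.length - 1 - cs.reverse.findIdx (fun c => c != '.') : Nat) : Int) :=
    pvBack_eq_some cs _ hjmaxlt hgetD hsufmax ((cs.length : Int) - 1)
      (by omega) (by omega)
  have hlast : pvLast cs 0 =
      some ((0 : Int) + (cs.length - 1 - cs.reverse.findIdx (fun c => c != '.') : Nat)) :=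
    pvLast_eq_some cs _ hjmaxlt hgetD hsufmax 0
  -- A's loop
  obtain ⟨a, b, hloop, hfa, hgb⟩ :=
    pvLoopA_inv cs (cs.length + 1) 0
      ((cs.length : Int) - 1) none none (by omega) (by omega) (by omega)
      (by intro _ m hm hml; omega)
      (by simp) (by intro _ m hm hmr; omega) (by simp) (by simp) (by simp) hPre'
  have ha : a = ((0 : Int) + (cs.findIdx (fun c => c != '.') : Nat)) :=
    (Option.some.inj (hfwd.symm.trans hfa)).symm
  have hb : b = ((cs.length - 1 - cs.reverse.findIdx (fun c => c != '.') : Nat) : Int) :=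
    (Option.some.inj (hback.symm.trans hgb)).symm
  simp only [hloop, foldB_eq, hfwd, hlast, ha, hb]
  simp
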